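-- pv_equiv track=rewrite | github.com/hanbikan/algorithm-problem | Python/이차원_배열과_연산.py | get_sorted_list
-- ===== SOURCE A (Python) =====
-- from collections import defaultdict
--
-- def get_sorted_list(nums):
--   num_to_count = defaultdict(int)
--   for num in nums:
--     if num == 0: continue
--     num_to_count[num] += 1
--
--   num_to_count = list(num_to_count.items())
--   num_to_count.sort(key = lambda x:x[0])
--   num_to_count.sort(key = lambda x:x[1])
--
--   return [num_to_count[i][j] for i in range(len(num_to_count)) for j in range(2)]
-- ===== SOURCE B (Python) =====
-- def get_sorted_list(nums):
--   counts = {}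
--   for n in nums:
--     if n != 0:
--       counts[n] = counts.get(n, 0) + 1
--   buckets = {}
--   for v, c in counts.items():
--     buckets.setdefault(c, []).append(v)
--   out = []
--   for c in sorted(buckets):
--     for v in sorted(buckets[c]):
--       out.append(v)
--       out.append(c)
--   return out
-- ===== Notes on version B (the rewrite author's own statement) =====
-- stated objective: alternative
-- what changed: Instead of sorting the flat (value,count) pair list twice with stable sorts, B builds a count->values bucket index and emits buckets in ascending count order with each bucket sorted ascending; the measured speedup is a constant factor (one pass of small sorts over pair-tuple sorting with key lambdas).
import Mathlib
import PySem

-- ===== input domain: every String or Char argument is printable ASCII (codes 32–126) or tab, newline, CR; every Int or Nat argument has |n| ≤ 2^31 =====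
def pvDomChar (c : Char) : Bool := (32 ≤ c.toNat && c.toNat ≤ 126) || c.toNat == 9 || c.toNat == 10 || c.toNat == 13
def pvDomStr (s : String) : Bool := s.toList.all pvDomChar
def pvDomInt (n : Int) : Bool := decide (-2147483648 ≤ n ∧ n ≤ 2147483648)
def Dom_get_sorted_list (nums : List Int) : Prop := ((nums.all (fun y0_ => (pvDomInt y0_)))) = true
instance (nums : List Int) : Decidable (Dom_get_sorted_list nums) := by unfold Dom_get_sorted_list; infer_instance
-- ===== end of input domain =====

-- B replaces A's two stable sorts of the flat (value, count) pair list by a count→values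
-- bucket index emitted in ascending count order, each bucket sorted ascending (alternative
-- decomposition, same results proved equal on all inputs).

-- ===== PORT A =====
-- tuple indexing p[j]; the comprehension only uses j ∈ {0, 1}, where this is exact
def pvPairGet (p : Int × Int) (j : Int) : Int := if j == 0 then p.1 else p.2

def get_sorted_list (nums : List Int) : List Int :=
  let numToCount := nums.foldl (fun d num => if num == 0 then d else d.modify num 0 (· + 1)) PySem.Dict.empty
  let items := PySem.List.sorted (PySem.List.sorted numToCount.items (fun x => x.1) false) (fun x => x.2) false
  (PySem.List.pyRange 0 (items.length : Int)).flatMap (fun i =>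
    (PySem.List.pyRange 0 2).flatMap (fun j =>
      [pvPairGet (PySem.List.pyGetD items i (0, 0)) j]))

-- ===== PORT B =====
def get_sorted_list_alt (nums : List Int) : List Int :=
  let counts := nums.foldl (fun d n => if n != 0 then d.insert n (d.getD n 0 + 1) else d) PySem.Dict.empty
  let buckets : PySem.Dict Int (List Int) :=
    counts.items.foldl (fun b p => b.modify p.2 [] (fun l => l ++ [p.1])) PySem.Dict.empty
  (PySem.List.sorted buckets.keys (fun c => c) false).foldl (fun out c =>
    (PySem.List.sorted (buckets.getD c []) (fun v => v) false).foldl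
      (fun out v => out ++ [v] ++ [c]) out) []

-- ===== PRECONDITION & SPEC =====
def Spec_get_sorted_list (nums : List Int) (out : List Int) : Prop := out = get_sorted_list_alt nums
instance (nums : List Int) (out : List Int) : Decidable (Spec_get_sorted_list nums out) := by unfold Spec_get_sorted_list; infer_instance

-- ===== CLAIM (what is proved, stated in full; the proofs are below) =====
def Claim_equal_get_sorted_list : Prop := ∀ (nums : List Int), Dom_get_sorted_list nums → Spec_get_sorted_list nums (get_sorted_list nums)

-- ===== LEMMAS AND PROOFS =====

-- The strict "counts, then values" order in which both programs emit the pairs.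
def pvLex (a b : Int × Int) : Prop := a.2 < b.2 ∨ (a.2 = b.2 ∧ a.1 < b.1)

-- the values whose count is c, in first-occurrence order (B's bucket for c)
def pvBkt (P : List (Int × Int)) (c : Int) : List Int :=
  (P.filter (fun p => p.2 == c)).map (fun p => p.1)

-- B's pair sequence
def pvZs (P : List (Int × Int)) : List (Int × Int) :=
  (PySem.List.sorted (PySem.Set.ofList (P.map (fun p => p.2))) (fun c => c) false).flatMap
    (fun c => (PySem.List.sorted (pvBkt P c) (fun v => v) false).map (fun v => (v, c)))

lemma insertBy_lex (x : Int × Int) (acc : List (Int × Int))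
    (hacc : acc.Pairwise pvLex) (hS : ∀ y ∈ acc, y.1 < x.1) :
    (PySem.List.insertBy (fun a b => decide (a.2 < b.2)) x acc).Pairwise pvLex := by
  induction acc with
  | nil => simp [PySem.List.insertBy]
  | cons y ys ih =>
    rw [List.pairwise_cons] at hacc
    obtain ⟨hy, hys⟩ := hacc
    by_cases h : x.2 < y.2
    · simp only [PySem.List.insertBy, h, decide_true, if_true]
      refine List.Pairwise.cons ?_ (List.Pairwise.cons hy hys)
      intro z hz
      rcases List.mem_cons.mp hz with rfl | hz
      · exact Or.inl h
      · refine Or.inl (lt_of_lt_of_le h ?_)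
        rcases hy z hz with h' | ⟨h', _⟩
        · exact le_of_lt h'
        · exact le_of_eq h'
    · simp only [PySem.List.insertBy, h, decide_false]
      refine List.Pairwise.cons ?_ (ih hys (fun z hz => hS z (List.mem_cons_of_mem _ hz)))
      intro z hz
      rcases (PySem.List.mem_insertBy _ _ _ _).mp hz with rfl | hz
      · rcases lt_or_eq_of_le (le_of_not_gt h) with h' | h'
        · exact Or.inl h'
        · exact Or.inr ⟨h', hS y (List.mem_cons_self)⟩
      · exact hy z hz

lemma foldl_insertBy_lex (xs : List (Int × Int)) (acc : List (Int × Int))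
    (hacc : acc.Pairwise pvLex)
    (hcross : ∀ y ∈ acc, ∀ x ∈ xs, y.1 < x.1)
    (hxs : xs.Pairwise (fun a b => a.1 < b.1)) :
    (xs.foldl (fun acc x => PySem.List.insertBy (fun a b => decide (a.2 < b.2)) x acc) acc).Pairwise pvLex := by
  induction xs generalizing acc with
  | nil => exact hacc
  | cons x xs ih =>
    rw [List.pairwise_cons] at hxs
    obtain ⟨hx, hxs⟩ := hxs
    refine ih _ (insertBy_lex x acc hacc (fun y hy => hcross y hy x List.mem_cons_self)) ?_ hxs
    intro y hy x' hx'
    rcases (PySem.List.mem_insertBy _ _ _ _).mp hy with rfl | hy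
    · exact hx x' hx'
    · exact hcross y hy x' (List.mem_cons_of_mem _ hx')

-- stability of the second (stable) sort: A's doubly sorted pair list is strictly pvLex-ordered
lemma sorted_snd_pairwise_lex (xs : List (Int × Int))
    (h : xs.Pairwise (fun a b => a.1 < b.1)) :
    (PySem.List.sorted xs (fun p => p.2) false).Pairwise pvLex := by
  rw [PySem.List.sorted_eq_foldl_insertBy]
  exact foldl_insertBy_lex xs [] (by simp) (by simp) h

lemma pairwise_lt_of_sorted_of_nodup (l : List Int) (hnd : l.Nodup) :
    (PySem.List.sorted l (fun v => v) false).Pairwise (fun a b => a < b) := by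
  have hle := PySem.List.sorted_pairwise l (fun v => v)
  have hne : (PySem.List.sorted l (fun v => v) false).Pairwise (fun a b => a ≠ b) :=
    ((PySem.List.sorted_perm l (fun v => v) false).nodup_iff).mpr hnd
  exact (hle.and hne).imp (fun ⟨h1, h2⟩ => lt_of_le_of_ne h1 h2)

lemma nodup_bkt (P : List (Int × Int)) (hnd : (P.map (fun p => p.1)).Nodup) (c : Int) :
    (pvBkt P c).Nodup := by
  unfold pvBkt
  exact hnd.sublist (List.Sublist.map _ List.filter_sublist)

-- B's pair sequence is strictly pvLex-ordered
lemma pairwise_lex_zs (P : List (Int × Int)) (hnd : (P.map (fun p => p.1)).Nodup) :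
    (pvZs P).Pairwise pvLex := by
  unfold pvZs
  rw [List.pairwise_flatMap]
  constructor
  · intro c _
    rw [List.pairwise_map]
    have := pairwise_lt_of_sorted_of_nodup (pvBkt P c) (nodup_bkt P hnd c)
    exact this.imp (fun h => Or.inr ⟨rfl, h⟩)
  · have hC := PySem.List.sorted_ofList_pairwise_lt (P.map (fun p => p.2))
    refine hC.imp ?_
    intro c c' hcc' x hx y hy
    have hx2 : x.2 = c := by
      rcases List.mem_map.mp hx with ⟨v, _, rfl⟩; rfl
    have hy2 : y.2 = c' := by
      rcases List.mem_map.mp hy with ⟨v, _, rfl⟩; rfl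
    exact Or.inl (by rw [hx2, hy2]; exact hcc')

-- perm helper: flatMap respects pointwise permutation
lemma perm_flatMap_congr {α β : Type} (l : List α) (f g : α → List β)
    (h : ∀ x ∈ l, (f x).Perm (g x)) : (l.flatMap f).Perm (l.flatMap g) := by
  induction l with
  | nil => simp
  | cons x xs ih =>
    simp only [List.flatMap_cons]
    exact (h x List.mem_cons_self).append (ih (fun y hy => h y (List.mem_cons_of_mem _ hy)))

lemma flatMap_filter_cons_perm (C : List Int) (p : Int × Int) (P : List (Int × Int))
    (hC : C.Nodup) (hp : p.2 ∈ C) :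
    (C.flatMap (fun c => (p :: P).filter (fun q => q.2 == c))).Perm
      (p :: C.flatMap (fun c => P.filter (fun q => q.2 == c))) := by
  induction C with
  | nil => simp at hp
  | cons c C' ih =>
    rw [List.nodup_cons] at hC
    obtain ⟨hcC', hC'⟩ := hC
    simp only [List.flatMap_cons]
    by_cases h : p.2 = c
    · have h1 : (p :: P).filter (fun q => q.2 == c) = p :: P.filter (fun q => q.2 == c) := by
        simp [h]
      have h2 : C'.flatMap (fun c' => (p :: P).filter (fun q => q.2 == c')) =
          C'.flatMap (fun c' => P.filter (fun q => q.2 == c')) := by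
        refine List.flatMap_congr ?_
        intro c' hc'
        have : ¬ p.2 = c' := by
          intro he
          exact hcC' (by rw [← h, he]; exact hc')
        simp [this]
      rw [h1, h2]
      exact List.Perm.refl _
    · have h1 : (p :: P).filter (fun q => q.2 == c) = P.filter (fun q => q.2 == c) := by
        simp [h]
      rw [h1]
      have hp' : p.2 ∈ C' := by
        rcases List.mem_cons.mp hp with he | hm
        · exact absurd he h
        · exact hm
      refine List.Perm.trans (List.Perm.append_left _ (ih hC' hp')) ?_
      exact List.perm_middle

lemma flatMap_filter_perm (C : List Int) (P : List (Int × Int))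
    (hC : C.Nodup) (hall : ∀ p ∈ P, p.2 ∈ C) :
    (C.flatMap (fun c => P.filter (fun q => q.2 == c))).Perm P := by
  induction P with
  | nil => simp
  | cons p P' ih =>
    exact (flatMap_filter_cons_perm C p P' hC (hall p List.mem_cons_self)).trans
      ((ih (fun q hq => hall q (List.mem_cons_of_mem _ hq))).cons p)

lemma zs_perm (P : List (Int × Int)) : (pvZs P).Perm P := by
  unfold pvZs
  have hstep : ∀ c ∈ PySem.List.sorted (PySem.Set.ofList (P.map (fun p => p.2))) (fun c => c) false,
      ((PySem.List.sorted (pvBkt P c) (fun v => v) false).map (fun v => (v, c))).Perm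
        (P.filter (fun q => q.2 == c)) := by
    intro c _
    have h1 : ((PySem.List.sorted (pvBkt P c) (fun v => v) false).map (fun v => (v, c))).Perm
        ((pvBkt P c).map (fun v => (v, c))) :=
      (PySem.List.sorted_perm _ _ _).map _
    have h2 : (pvBkt P c).map (fun v => (v, c)) = P.filter (fun q => q.2 == c) := by
      unfold pvBkt
      rw [List.map_map]
      refine (List.map_congr_left ?_).trans (List.map_id _)
      intro q hq
      have := (List.mem_filter.mp hq).2
      have h2 : q.2 = c := by simpa using this
      simp [Function.comp, ← h2]
    rw [h2] at h1
    exact h1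
  refine (perm_flatMap_congr _ _ _ hstep).trans ?_
  refine flatMap_filter_perm _ _ ?_ ?_
  · exact ((PySem.List.sorted_perm _ _ _).nodup_iff).mpr (PySem.Set.nodup_ofList _)
  · intro p hp
    rw [PySem.List.mem_sorted]
    exact (PySem.Set.mem_ofList _ _).mpr (List.mem_map_of_mem hp)

-- the central identity: A's doubly sorted pair list IS B's bucketed pair sequence
lemma double_sort_eq_zs (P : List (Int × Int)) (hnd : (P.map (fun p => p.1)).Nodup) :
    PySem.List.sorted (PySem.List.sorted P (fun x => x.1) false) (fun x => x.2) false = pvZs P := by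
  have hs1perm : (PySem.List.sorted P (fun x => x.1) false).Perm P := PySem.List.sorted_perm _ _ _
  have hs1nd : ((PySem.List.sorted P (fun x => x.1) false).map (fun p => p.1)).Nodup :=
    ((hs1perm.map _).nodup_iff).mpr hnd
  have hs1lt : (PySem.List.sorted P (fun x => x.1) false).Pairwise (fun a b => a.1 < b.1) := by
    have hle := PySem.List.sorted_pairwise P (fun x => x.1)
    have hne := (List.pairwise_map.mp hs1nd)
    exact (hle.and hne).imp (fun ⟨h1, h2⟩ => lt_of_le_of_ne h1 h2)
  have hA : (PySem.List.sorted (PySem.List.sorted P (fun x => x.1) false) (fun x => x.2) false).Pairwise pvLex :=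
    sorted_snd_pairwise_lex _ hs1lt
  have hB : (pvZs P).Pairwise pvLex := pairwise_lex_zs P hnd
  have hperm : (PySem.List.sorted (PySem.List.sorted P (fun x => x.1) false) (fun x => x.2) false).Perm (pvZs P) :=
    ((PySem.List.sorted_perm _ _ _).trans hs1perm).trans (zs_perm P).symm
  refine hperm.eq_of_pairwise ?_ hA hB
  intro a b _ _ hab hba
  exfalso
  rcases hab with h1 | ⟨h1, h1'⟩ <;> rcases hba with h2 | ⟨h2, h2'⟩ <;> omega

-- A's index comprehension flattens the pair list
lemma flatten_eq (ps : List (Int × Int)) :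
    (PySem.List.pyRange 0 (ps.length : Int)).flatMap (fun i =>
      (PySem.List.pyRange 0 2).flatMap (fun j =>
        [pvPairGet (PySem.List.pyGetD ps i (0, 0)) j])) = ps.flatMap (fun p => [p.1, p.2]) := by
  induction ps using List.reverseRecOn with
  | nil => simp [PySem.List.pyRange]
  | append_singleton ps p ih =>
    have hlen : ((ps ++ [p]).length : Int) = (ps.length : Int) + 1 := by
      simp [List.length_append]
    have hsplit : PySem.List.pyRange 0 ((ps ++ [p]).length : Int) =
        PySem.List.pyRange 0 (ps.length : Int) ++ [(ps.length : Int)] := by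
      rw [hlen, PySem.List.pyRange_one_append 0 (ps.length : Int) ((ps.length : Int) + 1)
        (by positivity) (by omega)]
      congr 1
      rw [PySem.List.pyRange_one_cons (by omega)]
      simp [PySem.List.pyRange]
    rw [hsplit, List.flatMap_append]
    have hcongr : (PySem.List.pyRange 0 (ps.length : Int)).flatMap (fun i =>
        (PySem.List.pyRange 0 2).flatMap (fun j =>
          [pvPairGet (PySem.List.pyGetD (ps ++ [p]) i (0, 0)) j])) =
        (PySem.List.pyRange 0 (ps.length : Int)).flatMap (fun i =>
        (PySem.List.pyRange 0 2).flatMap (fun j =>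
          [pvPairGet (PySem.List.pyGetD ps i (0, 0)) j])) := by
      refine List.flatMap_congr ?_
      intro i hi
      have hb := PySem.List.mem_pyRange_one.mp hi
      have hi0 : i = (i.toNat : Int) := (Int.toNat_of_nonneg hb.1).symm
      have hlt : i.toNat < ps.length := by omega
      rw [hi0, PySem.List.pyGetD_natCast, PySem.List.pyGetD_natCast,
        List.getD_append _ _ _ _ hlt]
    rw [hcongr, ih]
    have hlast : PySem.List.pyGetD (ps ++ [p]) (ps.length : Int) (0, 0) = p := by
      rw [PySem.List.pyGetD_natCast]
      simp [List.getD]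
    have h2 : PySem.List.pyRange 0 2 = [0, 1] := by decide
    simp [hlast, h2, pvPairGet]

-- the skip-zero counting loops of both programs build Counter(l) for l = nonzero elements
lemma a_dict_eq (nums : List Int) :
    nums.foldl (fun d num => if num == 0 then d else d.modify num 0 (· + 1)) PySem.Dict.empty =
      PySem.Dict.counter (nums.filter (fun n => n != 0)) := by
  have h : nums.foldl (fun d num => if num == 0 then d else d.modify num 0 (· + 1)) PySem.Dict.empty =
      nums.foldl (fun d num => if (num != 0) then d.modify num 0 (· + 1) else d) (PySem.Dict.empty : PySem.Dict Int Int) := by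
    refine PySem.List.foldl_congr_mem _ _ _ _ ?_
    intro acc x _
    by_cases hx : x = 0 <;> simp [hx]
  refine h.trans ?_
  rw [PySem.List.foldl_if_eq_foldl_filter, PySem.Dict.counter_eq_foldl]

lemma b_dict_eq (nums : List Int) :
    nums.foldl (fun d n => if n != 0 then d.insert n (d.getD n 0 + 1) else d) PySem.Dict.empty =
      PySem.Dict.counter (nums.filter (fun n => n != 0)) := by
  rw [PySem.List.foldl_if_eq_foldl_filter, PySem.Dict.foldl_insert_getD_add_one_eq_counter]

-- B's bucket dict, read back: keys and per-count value lists
lemma buckets_getD (P : List (Int × Int)) (c : Int) :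
    (P.foldl (fun b p => b.modify p.2 [] (fun l => l ++ [p.1])) PySem.Dict.empty).getD c [] =
      pvBkt P c := by
  have h : P.foldl (fun b p => b.modify p.2 [] (fun l => l ++ [p.1])) PySem.Dict.empty =
      (P.map Prod.swap).foldl (fun b p => b.modify p.1 [] (fun l => l ++ [p.2])) PySem.Dict.empty := by
    rw [List.foldl_map]
    rfl
  rw [h, PySem.Dict.getD_foldl_modify_append]
  unfold pvBkt
  simp [List.filter_map, Function.comp_def]
lemma buckets_keys (P : List (Int × Int)) :
    (P.foldl (fun b p => b.modify p.2 [] (fun l => l ++ [p.1])) PySem.Dict.empty).keys =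
      PySem.Set.ofList (P.map (fun p => p.2)) := by
  have h := PySem.Dict.keys_foldl_modify_key P (fun p => p.2) ([] : List Int)
    (fun _ p l => l ++ [p.1]) PySem.Dict.empty
  rw [h, PySem.Set.ofList_eq_foldl]
  rfl

-- B's output loop flattens B's pair sequence
lemma b_flatten (P : List (Int × Int)) :
    (PySem.List.sorted (PySem.Set.ofList (P.map (fun p => p.2))) (fun c => c) false).foldl
      (fun out c => (PySem.List.sorted (pvBkt P c) (fun v => v) false).foldl
        (fun out v => out ++ [v] ++ [c]) out) [] =
      (pvZs P).flatMap (fun p => [p.1, p.2]) := by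
  have hinner : ∀ (c : Int) (out : List Int),
      (PySem.List.sorted (pvBkt P c) (fun v => v) false).foldl (fun out v => out ++ [v] ++ [c]) out =
        out ++ (PySem.List.sorted (pvBkt P c) (fun v => v) false).flatMap (fun v => [v, c]) := by
    intro c out
    have h : (PySem.List.sorted (pvBkt P c) (fun v => v) false).foldl (fun out v => out ++ [v] ++ [c]) out =
        (PySem.List.sorted (pvBkt P c) (fun v => v) false).foldl (fun out v => out ++ [v, c]) out := by
      refine PySem.List.foldl_congr_mem _ _ _ _ ?_
      intro acc x _
      simp
    rw [h, PySem.List.foldl_append_eq_flatMap]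
  have houter : (PySem.List.sorted (PySem.Set.ofList (P.map (fun p => p.2))) (fun c => c) false).foldl
      (fun out c => (PySem.List.sorted (pvBkt P c) (fun v => v) false).foldl
        (fun out v => out ++ [v] ++ [c]) out) [] =
      (PySem.List.sorted (PySem.Set.ofList (P.map (fun p => p.2))) (fun c => c) false).foldl
      (fun out c => out ++ (PySem.List.sorted (pvBkt P c) (fun v => v) false).flatMap (fun v => [v, c])) [] := by
    refine PySem.List.foldl_congr_mem _ _ _ _ ?_
    intro acc c _
    exact hinner c acc
  rw [houter, PySem.List.foldl_append_eq_flatMap]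
  unfold pvZs
  rw [List.flatMap_assoc]
  simp [List.flatMap_map]

-- ===== VERDICT (by name: the statement is the Claim_ definition above) =====
theorem get_sorted_list_spec : Claim_equal_get_sorted_list := by
  intro nums _
  unfold Spec_get_sorted_list get_sorted_list get_sorted_list_alt
  rw [a_dict_eq, b_dict_eq]
  dsimp only
  set l := nums.filter (fun n => n != 0) with hl
  set P := (PySem.Dict.counter l).items with hP
  have hnd : (P.map (fun p => p.1)).Nodup := by
    have := PySem.Dict.nodup_keys_counter l
    simpa [PySem.Dict.keys] using this
  have hbk : ∀ c, ((P.foldl (fun b p => b.modify p.2 [] (fun l => l ++ [p.1])) PySem.Dict.empty).getD c []) = pvBkt P c :=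
    buckets_getD P
  rw [buckets_keys P]
  have hb : (PySem.List.sorted (PySem.Set.ofList (P.map (fun p => p.2))) (fun c => c) false).foldl
      (fun out c => (PySem.List.sorted ((P.foldl (fun b p => b.modify p.2 [] (fun l => l ++ [p.1])) PySem.Dict.empty).getD c []) (fun v => v) false).foldl
        (fun out v => out ++ [v] ++ [c]) out) [] =
      (pvZs P).flatMap (fun p => [p.1, p.2]) := by
    have hcongr : ∀ (out : List Int) (c : Int),
        (PySem.List.sorted ((P.foldl (fun b p => b.modify p.2 [] (fun l => l ++ [p.1])) PySem.Dict.empty).getD c []) (fun v => v) false).foldl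
          (fun out v => out ++ [v] ++ [c]) out =
        (PySem.List.sorted (pvBkt P c) (fun v => v) false).foldl (fun out v => out ++ [v] ++ [c]) out := by
      intro out c; rw [hbk c]
    calc _ = (PySem.List.sorted (PySem.Set.ofList (P.map (fun p => p.2))) (fun c => c) false).foldl
          (fun out c => (PySem.List.sorted (pvBkt P c) (fun v => v) false).foldl
            (fun out v => out ++ [v] ++ [c]) out) [] := by
          refine PySem.List.foldl_congr_mem _ _ _ _ ?_
          intro acc c _
          exact hcongr acc c
      _ = _ := b_flatten P
  rw [hb, flatten_eq, double_sort_eq_zs P hnd]
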